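-- pv_equiv track=rewrite | github.com/naliliV2/Convert-substitle | src/exctract_sub_ass/extract_ass.py | remove_brackets
-- ===== SOURCE A (Python) =====
-- def remove_brackets(line):
--     #transform line in a list
--     line = list(line)
--     garbage = False
--
--     for i in range(len(line)):
--         if line[i] == '{':
--             garbage = True
--         elif line[i] == '}':
--             line[i] = ' '
--             garbage = False
--
--         if garbage == True:
--             line[i] = ' '
--     #retransform line in a str
--     line = ''.join(line)
--
--     return line
-- ===== SOURCE B (Python) =====
-- def remove_brackets(line):
--     out = []
--     i = 0
--     n = len(line)
--     while i < n:
--         c = line[i]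
--         if c == '{':
--             j = line.find('}', i)
--             end = n if j == -1 else j + 1
--             out.append(' ' * (end - i))
--             i = end
--         elif c == '}':
--             out.append(' ')
--             i += 1
--         else:
--             out.append(c)
--             i += 1
--     return ''.join(out)
-- ===== Notes on version B (the rewrite author's own statement) =====
-- stated objective: alternative
-- what changed: Replaced the per-character garbage-flag state machine with a segment-jumping scan: on '{' it finds the next '}' directly and emits one space run for the whole brace region, stray '}' becomes a space, other characters are copied.
import Mathlib
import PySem

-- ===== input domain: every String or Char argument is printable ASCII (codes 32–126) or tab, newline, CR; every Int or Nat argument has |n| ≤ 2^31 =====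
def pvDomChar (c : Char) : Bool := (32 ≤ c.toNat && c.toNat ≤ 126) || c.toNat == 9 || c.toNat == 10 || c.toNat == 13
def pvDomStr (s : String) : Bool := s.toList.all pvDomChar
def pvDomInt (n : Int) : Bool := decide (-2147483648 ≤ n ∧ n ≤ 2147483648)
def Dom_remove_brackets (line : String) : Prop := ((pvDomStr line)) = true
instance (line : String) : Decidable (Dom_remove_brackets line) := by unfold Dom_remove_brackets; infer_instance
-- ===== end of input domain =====

-- B replaces A's per-character garbage-flag state machine by a segment-jumping scan
-- ('{' → find the next '}' and emit one space run for the whole region); alternative, same cost.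

-- ===== PORT A =====
-- A's index loop over the char list, carrying the garbage flag; each char is rewritten
-- with the same branch order as the Python body.
def removeGo (garbage : Bool) : List Char → List Char
  | [] => []
  | c :: rest =>
    let g := if c = '{' then true else if c = '}' then false else garbage
    let c' := if c = '}' then ' ' else c
    (if g then ' ' else c') :: removeGo g rest

def remove_brackets (line : String) : String :=
  String.ofList (removeGo false line.toList)

-- ===== PORT B =====
-- Source B's while loop: on '{' find the next '}' (span = line.find('}', i)), emit a space run
-- covering the region, jump past it; stray '}' → ' '; otherwise copy the char.
def altGo : List Char → List Char
  | [] => []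
  | c :: rest =>
    if c = '{' then
      match h : rest.span (fun x => x ≠ '}') with
      | (inside, []) => List.replicate (1 + inside.length) ' '
      | (inside, _ :: tail) =>
          List.replicate (1 + inside.length + 1) ' ' ++ altGo tail
    else if c = '}' then ' ' :: altGo rest
    else c :: altGo rest
termination_by l => l.length
decreasing_by
  · simp only [List.span_eq_takeWhile_dropWhile, Prod.mk.injEq] at h
    have hle := List.length_dropWhile_le (p := fun x => decide (x ≠ '}')) (l := rest)
    have h3 : (rest.dropWhile (fun x => decide (x ≠ '}'))).length = tail.length + 1 := by
      rw [h.2]; simp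
    simp only [List.length_cons]
    omega
  · simp
  · simp

def remove_brackets_alt (line : String) : String :=
  String.ofList (altGo line.toList)

-- ===== PRECONDITION & SPEC =====
def Spec_remove_brackets (line : String) (out : String) : Prop := out = remove_brackets_alt line
instance (line : String) (out : String) : Decidable (Spec_remove_brackets line out) := by unfold Spec_remove_brackets; infer_instance

-- ===== CLAIM (what is proved, stated in full; the proofs are below) =====
def Claim_equal_remove_brackets : Prop := ∀ (line : String), Dom_remove_brackets line → Spec_remove_brackets line (remove_brackets line)

-- ===== LEMMAS AND PROOFS =====

theorem altGo_nil : altGo [] = [] := by rw [altGo.eq_def]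

theorem altGo_close (rest : List Char) : altGo ('}' :: rest) = ' ' :: altGo rest := by
  rw [altGo.eq_def]; simp

theorem altGo_other (c : Char) (rest : List Char) (h1 : c ≠ '{') (h2 : c ≠ '}') :
    altGo (c :: rest) = c :: altGo rest := by
  rw [altGo.eq_def]; simp [h1, h2]

theorem altGo_open (rest : List Char) :
    altGo ('{' :: rest) =
      match rest.span (fun x => x ≠ '}') with
      | (inside, []) => List.replicate (1 + inside.length) ' '
      | (inside, _ :: tail) => List.replicate (1 + inside.length + 1) ' ' ++ altGo tail := by
  rw [altGo.eq_def]
  dsimp only []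
  rw [if_pos rfl]
  split
  · next inside h' =>
      rw [show List.span (fun x => decide (x ≠ '}')) rest = (inside, []) from h']
  · next inside head tail h' =>
      rw [show List.span (fun x => decide (x ≠ '}')) rest = (inside, head :: tail) from h']

-- With the flag on, A spaces every char up to and including the next '}' and resumes with flag off.
theorem removeGo_true (l : List Char) :
    removeGo true l =
      match l.span (fun x => x ≠ '}') with
      | (inside, []) => List.replicate inside.length ' '
      | (inside, _ :: tail) => List.replicate (inside.length + 1) ' ' ++ removeGo false tail := by
  induction l with
  | nil => simp [removeGo]
  | cons c rest ih =>
    by_cases hc : c = '}'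
    · subst hc
      rw [List.span_eq_takeWhile_dropWhile,
        List.takeWhile_cons_of_neg (by simp), List.dropWhile_cons_of_neg (by simp)]
      simp [removeGo]
    · have hstep : removeGo true (c :: rest) = ' ' :: removeGo true rest := by
        by_cases h1 : c = '{' <;> simp [removeGo, h1, hc]
      rw [hstep, ih]
      rw [List.span_eq_takeWhile_dropWhile, List.span_eq_takeWhile_dropWhile,
        List.takeWhile_cons_of_pos (by simp [hc]), List.dropWhile_cons_of_pos (by simp [hc])]
      cases hd : rest.dropWhile (fun x => decide (x ≠ '}')) with
      | nil => simp [List.replicate_succ]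
      | cons y t => simp [List.replicate_succ]

theorem removeGo_false_eq_altGo (l : List Char) : removeGo false l = altGo l := by
  induction hn : l.length using Nat.strong_induction_on generalizing l with
  | _ n ih =>
    cases l with
    | nil => simp [removeGo, altGo_nil]
    | cons c rest =>
      by_cases h1 : c = '{'
      · subst h1
        have hA : removeGo false ('{' :: rest) = ' ' :: removeGo true rest := by
          simp [removeGo]
        rw [hA, removeGo_true, altGo_open]
        cases hs : rest.span (fun x => x ≠ '}') with
        | mk inside after =>
          cases after with
          | nil => simp [List.replicate_succ, Nat.add_comm]
          | cons y tail =>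
            have h2 : (y :: tail) = rest.dropWhile (fun x => decide (x ≠ '}')) := by
              have hsp := congrArg Prod.snd
                (List.span_eq_takeWhile_dropWhile (p := fun x => x ≠ '}') (l := rest))
              rw [hs] at hsp
              exact hsp
            have hlen : tail.length < n := by
              have hd := List.length_dropWhile_le (p := fun x => decide (x ≠ '}')) (l := rest)
              have hle : (y :: tail).length ≤ rest.length := h2 ▸ hd
              simp only [List.length_cons] at hle hn
              omega
            simp only [ih tail.length hlen tail rfl]
            rw [show 1 + inside.length + 1 = inside.length + 1 + 1 from by omega]
            simp [List.replicate_succ]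
      · by_cases h2 : c = '}'
        · subst h2
          have hr : rest.length < n := by simp at hn; omega
          simp [removeGo, altGo_close, ih rest.length hr rest rfl]
        · have hr : rest.length < n := by simp at hn; omega
          simp [removeGo, altGo_other c rest h1 h2, h1, h2, ih rest.length hr rest rfl]

-- ===== VERDICT (by name: the statement is the Claim_ definition above) =====
theorem remove_brackets_spec : Claim_equal_remove_brackets := by
  intro line _
  unfold Spec_remove_brackets remove_brackets remove_brackets_alt
  rw [removeGo_false_eq_altGo]
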